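-- pv_equiv track=rewrite | github.com/vromanuk/leetcode-problems | solutions/smallest_string_with_swaps.py | smallest_string_with_swaps_bfs
-- ===== SOURCE A (Python) =====
-- from collections import deque
--
-- def smallest_string_with_swaps_bfs(s: str, pairs: list[list[int]]) -> str:
--     if not s or not pairs:
--         return s
--
--     def bfs(root):
--         q = deque([root])
--         component = []
--
--         while q:
--             current = q.popleft()
--
--             if current in seen:
--                 continue
--
--             seen.add(current)
--             component.append(current)
--
--             for neighbor in graph[current]:
--                 if neighbor not in seen:
--                     q.append(neighbor)
--
--         return component
--
--     n = len(s)
--     seen = set()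
--     graph = {i: [] for i in range(n)}
--
--     for a, b in pairs:
--         graph[a].append(b)
--         graph[b].append(a)
--
--     result = list(s)
--
--     for i in range(n):
--         if i not in seen:
--             component = bfs(i)
--
--             sorted_indices = sorted(component)
--             sorted_chars = sorted(s[idx] for idx in sorted_indices)
--
--             for idx, ch in zip(sorted_indices, sorted_chars):
--                 result[idx] = ch
--
--     return "".join(result)
-- ===== SOURCE B (Python) =====
-- def smallest_string_with_swaps_bfs(s: str, pairs: list[list[int]]) -> str:
--     if not s or not pairs:
--         return s
--
--     n = len(s)
--     # merge-by-relabelling instead of BFS: each index carries a class label;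
--     # processing a pair merges the two labels by rewriting one into the other
--     label = list(range(n))
--     for a, b in pairs:
--         la, lb = label[a], label[b]
--         if la != lb:
--             label = [la if x == lb else x for x in label]
--
--     groups = {}
--     for i in range(n):
--         groups.setdefault(label[i], []).append(i)
--
--     result = list(s)
--     for idxs in groups.values():
--         for idx, ch in zip(idxs, sorted(s[i] for i in idxs)):
--             result[idx] = ch
--
--     return "".join(result)
-- ===== Notes on version B (the rewrite author's own statement) =====
-- stated objective: alternative
-- what changed: Replaces the adjacency-dict + shared-seen BFS per component by a union-find-style label-merging pass over the pairs (rewriting one class label into the other) followed by a single dict grouping pass over the indices; the sorted-character write-back per group is unchanged.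
import Mathlib
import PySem

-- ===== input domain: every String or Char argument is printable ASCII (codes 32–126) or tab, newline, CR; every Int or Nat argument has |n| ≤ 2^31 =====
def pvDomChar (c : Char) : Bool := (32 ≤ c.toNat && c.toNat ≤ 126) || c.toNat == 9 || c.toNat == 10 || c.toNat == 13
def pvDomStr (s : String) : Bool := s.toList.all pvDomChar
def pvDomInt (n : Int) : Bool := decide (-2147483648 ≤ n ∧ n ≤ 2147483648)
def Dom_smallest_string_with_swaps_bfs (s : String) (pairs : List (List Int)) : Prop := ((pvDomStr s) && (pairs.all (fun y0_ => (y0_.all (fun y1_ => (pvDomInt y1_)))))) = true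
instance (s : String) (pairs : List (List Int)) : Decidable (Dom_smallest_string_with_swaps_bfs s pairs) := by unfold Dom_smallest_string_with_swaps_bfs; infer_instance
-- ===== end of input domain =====

-- B replaces A's dict-of-adjacency-lists + BFS with a label-merging (relabelling) pass over the
-- pairs followed by one dict grouping pass; same return value on all inputs admitted by Pre_.

-- ===== PORT A =====
-- result[idx] = ch : exact for in-range idx (Python raises IndexError otherwise; such
-- idx do not occur on inputs admitted by Pre_)
def pvSetPy (r : List Char) (i : Int) (c : Char) : List Char :=
  if 0 ≤ i ∧ i.toNat < r.length then r.set i.toNat c else r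

-- the write-back lines shared verbatim by both Pythons:
-- for idx, ch in zip(idxs, sorted(s[i] for i in idxs)): result[idx] = ch
-- (s[i] ported as pyGetD with a dummy default: i is in range on admitted inputs)
def pvWriteGroup (cs : List Char) (res : List Char) (idxs : List Int) : List Char :=
  (idxs.zip (PySem.List.sorted (idxs.map (fun i => PySem.List.pyGetD cs i ' ')) (fun x => x))).foldl
    (fun r p => pvSetPy r p.1 p.2) res

-- graph = {i: [] for i in range(n)}; graph[a].append(b); graph[b].append(a)
-- (Dict.modify would create a missing key where Python raises KeyError, and a pair that is not a
-- 2-element list raises ValueError in Python and is skipped here — both only outside Pre_)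
def pvBuildGraph (n : Int) (pairs : List (List Int)) : PySem.Dict Int (List Int) :=
  pairs.foldl (fun g p =>
    match p with
    | [a, b] => (g.modify a [] (· ++ [b])).modify b [] (· ++ [a])
    | _ => g)
    ((PySem.List.pyRange 0 n 1).foldl (fun d i => d.insert i ([] : List Int)) PySem.Dict.empty)

-- the while-loop of bfs; the fuel argument only makes the recursion structural — on inputs
-- admitted by Pre_ it never reaches 0 (see the loop lemma below)
def pvBfsLoop (graph : PySem.Dict Int (List Int)) :
    Nat → PySem.Set Int → List Int → List Int → List Int × PySem.Set Int
  | 0, seen, _, comp => (comp, seen)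
  | fuel + 1, seen, q, comp =>
    match q with
    | [] => (comp, seen)
    | c :: q' =>
      if PySem.Set.contains seen c then pvBfsLoop graph fuel seen q' comp
      else
        let seen' := PySem.Set.add seen c
        pvBfsLoop graph fuel seen'
          (q' ++ (graph.getD c []).filter (fun y => !PySem.Set.contains seen' y))
          (comp ++ [c])

-- one iteration of A's outer 'for i in range(n)' loop; state = (seen, result)
def pvProcessA (graph : PySem.Dict Int (List Int)) (fuel : Nat) (cs : List Char)
    (st : PySem.Set Int × List Char) (i : Int) : PySem.Set Int × List Char :=
  if PySem.Set.contains st.1 i then st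
  else
    let r := pvBfsLoop graph fuel st.1 [i] []
    let si := PySem.List.sorted r.1 (fun x => x)
    (r.2, pvWriteGroup cs st.2 si)

def smallest_string_with_swaps_bfs (s : String) (pairs : List (List Int)) : String :=
  if s.toList = [] ∨ pairs = [] then s
  else
    let cs := s.toList
    let n : Int := PySem.Str.len s
    let graph := pvBuildGraph n pairs
    let fuel := 1 + (cs.length + 1) * (1 + 2 * pairs.length)
    let st := (PySem.List.pyRange 0 n 1).foldl (pvProcessA graph fuel cs) (PySem.Set.empty, cs)
    String.ofList st.2

-- ===== PORT B =====
-- label[j] lookup (in range on admitted inputs)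
def pvLf (lab : List Int) (j : Int) : Int := PySem.List.pyGetD lab j 0

-- the label-merging loop: for a, b in pairs: la, lb = label[a], label[b];
-- if la != lb: label = [la if x == lb else x for x in label]
def pvLabel (n : Int) (pairs : List (List Int)) : List Int :=
  pairs.foldl (fun lab p =>
    match p with
    | [a, b] =>
      let la := pvLf lab a
      let lb := pvLf lab b
      if la ≠ lb then lab.map (fun x => if x = lb then la else x) else lab
    | _ => lab)
    (PySem.List.pyRange 0 n 1)

def smallest_string_with_swaps_bfs_alt (s : String) (pairs : List (List Int)) : String :=
  if s.toList = [] ∨ pairs = [] then s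
  else
    let cs := s.toList
    let n : Int := PySem.Str.len s
    let label := pvLabel n pairs
    let groups := (PySem.List.pyRange 0 n 1).foldl
      (fun d i => d.modify (pvLf label i) [] (· ++ [i])) PySem.Dict.empty
    let res := groups.values.foldl (pvWriteGroup cs) cs
    String.ofList res

-- ===== PRECONDITION & SPEC =====
-- Pre_ excludes exactly the inputs where A raises: with a non-empty string and non-empty pairs,
-- a pair that is not a 2-element list (ValueError) or a pair element outside range(len(s)) (KeyError).
def Pre_smallest_string_with_swaps_bfs (s : String) (pairs : List (List Int)) : Prop :=
  s.toList = [] ∨ pairs = [] ∨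
    ∀ p ∈ pairs, p.length = 2 ∧ ∀ x ∈ p, 0 ≤ x ∧ x < (s.toList.length : Int)
instance (s : String) (pairs : List (List Int)) : Decidable (Pre_smallest_string_with_swaps_bfs s pairs) := by
  unfold Pre_smallest_string_with_swaps_bfs; infer_instance

def pvWitness_smallest_string_with_swaps_bfs : String × List (List Int) := ("dcab", [[0, 3], [1, 2]])

def Spec_smallest_string_with_swaps_bfs (s : String) (pairs : List (List Int)) (out : String) : Prop :=
  out = smallest_string_with_swaps_bfs_alt s pairs
instance (s : String) (pairs : List (List Int)) (out : String) : Decidable (Spec_smallest_string_with_swaps_bfs s pairs out) := by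
  unfold Spec_smallest_string_with_swaps_bfs; infer_instance

-- ===== CLAIM (what is proved, stated in full; the proofs are below) =====
def Claim_equal_smallest_string_with_swaps_bfs : Prop :=
  ∀ (s : String) (pairs : List (List Int)), Dom_smallest_string_with_swaps_bfs s pairs →
    Pre_smallest_string_with_swaps_bfs s pairs →
    Spec_smallest_string_with_swaps_bfs s pairs (smallest_string_with_swaps_bfs s pairs)

-- ===== LEMMAS AND PROOFS =====

-- the swap relation generated by the pairs, and its reflexive-transitive closure
def pvRel (pairs : List (List Int)) (x y : Int) : Prop :=
  ∃ a b : Int, [a, b] ∈ pairs ∧ ((x = a ∧ y = b) ∨ (x = b ∧ y = a))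
def pvE (pairs : List (List Int)) : Int → Int → Prop := Relation.ReflTransGen (pvRel pairs)

-- i is the smallest index of its label class
def pvMinRep (lab : List Int) (i : Int) : Bool :=
  (PySem.List.pyRange 0 i 1).all (fun j => !(pvLf lab j == pvLf lab i))
-- the ascending list of indices carrying label k
def pvClassList (nI : Int) (lab : List Int) (k : Int) : List Int :=
  (PySem.List.pyRange 0 nI 1).filter (fun y => pvLf lab y == k)

lemma pvRel_symm {pairs : List (List Int)} {x y : Int} (h : pvRel pairs x y) : pvRel pairs y x := by
  obtain ⟨a, b, hm, h⟩ := h; exact ⟨a, b, hm, h.symm.imp And.symm And.symm⟩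

lemma pvE_symm {pairs : List (List Int)} {x y : Int} (h : pvE pairs x y) : pvE pairs y x := by
  induction h with
  | refl => exact .refl
  | tail _ hr ih => exact Relation.ReflTransGen.trans (Relation.ReflTransGen.single (pvRel_symm hr)) ih

lemma pvClosed_rtg {pairs : List (List Int)} {S : List Int}
    (hcl : ∀ x ∈ S, ∀ y, pvRel pairs x y → y ∈ S) {x y : Int} (hx : x ∈ S) (h : pvE pairs x y) :
    y ∈ S := by
  induction h with
  | refl => exact hx
  | tail _ hr ih => exact hcl _ ih _ hr

lemma pvRel_range {pairs : List (List Int)} {nI : Int}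
    (hv : ∀ p ∈ pairs, p.length = 2 ∧ ∀ x ∈ p, 0 ≤ x ∧ x < nI) {x y : Int}
    (h : pvRel pairs x y) : (0 ≤ x ∧ x < nI) ∧ (0 ≤ y ∧ y < nI) := by
  obtain ⟨a, b, hm, h⟩ := h
  have ha := (hv _ hm).2 a (by simp)
  have hb := (hv _ hm).2 b (by simp)
  rcases h with ⟨rfl, rfl⟩ | ⟨rfl, rfl⟩ <;> exact ⟨‹_›, ‹_›⟩

lemma pvE_range {pairs : List (List Int)} {nI : Int}
    (hrr : ∀ x y : Int, pvRel pairs x y → (0 ≤ x ∧ x < nI) ∧ (0 ≤ y ∧ y < nI)) {x y : Int}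
    (h : pvE pairs x y) : x = y ∨ ((0 ≤ x ∧ x < nI) ∧ (0 ≤ y ∧ y < nI)) := by
  induction h with
  | refl => exact Or.inl rfl
  | tail _ hr ih =>
    right
    have := hrr _ _ hr
    rcases ih with rfl | ⟨hx, _⟩
    · exact this
    · exact ⟨hx, this.2⟩

lemma pvBuildGraph_getD (n : Int) (pairs : List (List Int)) (x : Int) :
    (pvBuildGraph n pairs).getD x [] = pairs.flatMap (fun p =>
      match p with
      | [a, b] => (if a = x then [b] else []) ++ (if b = x then [a] else [])
      | _ => []) := by
  have hinit : ∀ (l : List Int) (d : PySem.Dict Int (List Int)), d.getD x [] = [] →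
      (l.foldl (fun d i => d.insert i ([] : List Int)) d).getD x [] = [] := by
    intro l
    induction l with
    | nil => intro d hd; simpa using hd
    | cons i t ih =>
      intro d hd
      simp only [List.foldl_cons]
      refine ih _ ?_
      rw [PySem.Dict.getD_insert]
      split <;> simp [hd]
  have hmain : ∀ (ps : List (List Int)) (g : PySem.Dict Int (List Int)),
      (ps.foldl (fun g p => match p with
        | [a, b] => (g.modify a [] (· ++ [b])).modify b [] (· ++ [a])
        | _ => g) g).getD x [] = g.getD x [] ++ ps.flatMap (fun p =>
          match p with
          | [a, b] => (if a = x then [b] else []) ++ (if b = x then [a] else [])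
          | _ => []) := by
    intro ps
    induction ps with
    | nil => intro g; simp
    | cons p t ih =>
      intro g
      simp only [List.foldl_cons, List.flatMap_cons]
      rw [ih, ← List.append_assoc]
      rcases p with _ | ⟨a, _ | ⟨b, _ | ⟨c, u⟩⟩⟩
      · simp
      · simp
      · congr 1
        simp only [PySem.Dict.getD_modify]
        by_cases hxa : a = x <;> by_cases hxb : b = x
        · simp [hxa, hxb]
        · have h1 : ¬ x = b := fun h => hxb h.symm
          simp [hxa, hxb, h1]
        · have h1 : ¬ x = a := fun h => hxa h.symm
          simp [hxa, hxb, h1]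
        · have h1 : ¬ x = a := fun h => hxa h.symm
          have h2 : ¬ x = b := fun h => hxb h.symm
          simp [hxa, hxb, h1, h2]
      · simp
  rw [pvBuildGraph, hmain, hinit _ _ (by simp)]
  simp

lemma pvRel_iff_mem_graph (n : Int) (pairs : List (List Int)) (x y : Int) :
    y ∈ (pvBuildGraph n pairs).getD x [] ↔ pvRel pairs x y := by
  rw [pvBuildGraph_getD, List.mem_flatMap]
  constructor
  · rintro ⟨p, hp, hy⟩
    rcases p with _ | ⟨a, _ | ⟨b, _ | ⟨c, u⟩⟩⟩ <;> simp at hy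
    rcases hy with ⟨h1, h2⟩ | ⟨h1, h2⟩
    · exact ⟨a, b, hp, Or.inl ⟨h1.symm, h2⟩⟩
    · exact ⟨a, b, hp, Or.inr ⟨h1.symm, h2⟩⟩
  · rintro ⟨a, b, hm, ⟨rfl, rfl⟩ | ⟨rfl, rfl⟩⟩
    · exact ⟨[x, y], hm, by simp⟩
    · exact ⟨[y, x], hm, by simp⟩

lemma pvGraph_deg (n : Int) (pairs : List (List Int)) (c : Int) :
    ((pvBuildGraph n pairs).getD c []).length ≤ 2 * pairs.length := by
  rw [pvBuildGraph_getD]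
  induction pairs with
  | nil => simp
  | cons p t ih =>
    simp only [List.flatMap_cons, List.length_append, List.length_cons]
    have hp : (match p with
      | [a, b] => (if a = c then [b] else []) ++ (if b = c then [a] else [])
      | _ => ([] : List Int)).length ≤ 2 := by
      rcases p with _ | ⟨a, _ | ⟨b, _ | ⟨d, u⟩⟩⟩ <;> simp <;> split <;> split <;> simp
    omega

lemma pvNodupRange_len {nI : Int} (S : List Int) (h : S.Nodup)
    (hr : ∀ x ∈ S, 0 ≤ x ∧ x < nI) : S.length ≤ nI.toNat := by
  have hcard : S.toFinset.card = S.length := List.toFinset_card_of_nodup h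
  have hsub : S.toFinset ⊆ Finset.Ico (0 : Int) nI := by
    intro x hx
    rw [List.mem_toFinset] at hx
    rw [Finset.mem_Ico]
    exact hr x hx
  have := Finset.card_le_card hsub
  rwa [hcard, Int.card_Ico, Int.sub_zero] at this

lemma pvBfsLoop_nil (graph : PySem.Dict Int (List Int)) (fuel : Nat) (seen : PySem.Set Int)
    (comp : List Int) : pvBfsLoop graph fuel seen [] comp = (comp, seen) := by
  cases fuel <;> rfl

lemma pvBfsLoop_spec (graph : PySem.Dict Int (List Int)) (pairs : List (List Int)) (nI : Int) (D : Nat)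
    (hgr : ∀ x y : Int, y ∈ graph.getD x [] ↔ pvRel pairs x y)
    (hdeg : ∀ c : Int, (graph.getD c []).length ≤ D)
    (hrange : ∀ x y, pvRel pairs x y → (0 ≤ x ∧ x < nI) ∧ (0 ≤ y ∧ y < nI)) :
    ∀ (fuel : Nat) (seen q comp : List Int),
      seen.Nodup →
      (∀ x ∈ seen, 0 ≤ x ∧ x < nI) →
      (∀ x ∈ q, 0 ≤ x ∧ x < nI) →
      (∀ x ∈ seen, ∀ y, pvRel pairs x y → y ∈ seen ∨ y ∈ q) →
      q.length + (nI.toNat - seen.length) * (1 + D) ≤ fuel →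
      ∃ Δ : List Int,
        pvBfsLoop graph fuel seen q comp = (comp ++ Δ, seen ++ Δ) ∧
        (∀ y ∈ Δ, ∃ x ∈ q, pvE pairs x y) ∧
        (∀ x ∈ q, x ∈ seen ++ Δ) ∧
        (∀ x ∈ seen ++ Δ, ∀ y, pvRel pairs x y → y ∈ seen ++ Δ) ∧
        (seen ++ Δ).Nodup := by
  intro fuel
  induction fuel with
  | zero =>
    intro seen q comp hnd hsr hqr hfr hfuel
    rcases q with _ | ⟨c, q'⟩
    · refine ⟨[], by simp [pvBfsLoop_nil], by simp, by simp, ?_, by simpa using hnd⟩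
      intro x hx y hr
      rcases hfr x (by simpa using hx) y hr with h | h
      · simpa using h
      · simp at h
    · simp only [List.length_cons] at hfuel; omega
  | succ f ih =>
    intro seen q comp hnd hsr hqr hfr hfuel
    rcases q with _ | ⟨c, q'⟩
    · refine ⟨[], by simp [pvBfsLoop_nil], by simp, by simp, ?_, by simpa using hnd⟩
      intro x hx y hr
      rcases hfr x (by simpa using hx) y hr with h | h
      · simpa using h
      · simp at h
    · by_cases hc : c ∈ seen
      · have hcond : PySem.Set.contains seen c = true := (PySem.Set.contains_iff seen c).mpr hc
        have hstep : pvBfsLoop graph (f + 1) seen (c :: q') comp =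
            pvBfsLoop graph f seen q' comp := by
          simp only [pvBfsLoop, hcond, if_true]
        have hfr' : ∀ x ∈ seen, ∀ y, pvRel pairs x y → y ∈ seen ∨ y ∈ q' := by
          intro x hx y hr
          rcases hfr x hx y hr with h | h
          · exact Or.inl h
          · rcases List.mem_cons.mp h with rfl | h
            · exact Or.inl hc
            · exact Or.inr h
        have hfuel' : q'.length + (nI.toNat - seen.length) * (1 + D) ≤ f := by
          simp only [List.length_cons] at hfuel; omega
        obtain ⟨Δ, h1, h2, h3, h4, h5⟩ := ih seen q' comp hnd hsr
          (fun x hx => hqr x (by simp [hx])) hfr' hfuel'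
        refine ⟨Δ, by rw [hstep, h1], ?_, ?_, h4, h5⟩
        · intro y hy
          obtain ⟨x, hx, he⟩ := h2 y hy
          exact ⟨x, by simp [hx], he⟩
        · intro x hx
          rcases List.mem_cons.mp hx with rfl | hx
          · exact List.mem_append.mpr (Or.inl hc)
          · exact h3 x hx
      · have hcond : ¬ PySem.Set.contains seen c = true := fun h => hc ((PySem.Set.contains_iff seen c).mp h)
        have hstep : pvBfsLoop graph (f + 1) seen (c :: q') comp =
            pvBfsLoop graph f (seen ++ [c])
              (q' ++ (graph.getD c []).filter (fun y => !PySem.Set.contains (seen ++ [c]) y))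
              (comp ++ [c]) := by
          simp only [pvBfsLoop, hcond, Bool.false_eq_true, if_false, PySem.Set.add_of_not_mem hc,
            PySem.Set.contains_eq_listContains]
        have hcr : 0 ≤ c ∧ c < nI := hqr c (by simp)
        have hnd1 : (seen ++ [c]).Nodup := by
          rw [List.nodup_append]
          refine ⟨hnd, List.nodup_singleton c, ?_⟩
          intro a ha b hb
          rw [List.mem_singleton] at hb
          subst hb
          intro h
          exact hc (h ▸ ha)
        have hsr1 : ∀ x ∈ seen ++ [c], 0 ≤ x ∧ x < nI := by
          intro x hx
          rcases List.mem_append.mp hx with hx | hx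
          · exact hsr x hx
          · simp at hx; subst hx; exact hcr
        have hqr1 : ∀ x ∈ q' ++ (graph.getD c []).filter (fun y => !PySem.Set.contains (seen ++ [c]) y),
            0 ≤ x ∧ x < nI := by
          intro x hx
          rcases List.mem_append.mp hx with hx | hx
          · exact hqr x (by simp [hx])
          · exact (hrange c x ((hgr c x).mp (List.mem_filter.mp hx).1)).2
        have hfr1 : ∀ x ∈ seen ++ [c], ∀ y, pvRel pairs x y →
            y ∈ seen ++ [c] ∨ y ∈ q' ++ (graph.getD c []).filter (fun y => !PySem.Set.contains (seen ++ [c]) y) := by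
          intro x hx y hr
          rcases List.mem_append.mp hx with hx | hx
          · rcases hfr x hx y hr with h | h
            · exact Or.inl (List.mem_append.mpr (Or.inl h))
            · rcases List.mem_cons.mp h with rfl | h
              · exact Or.inl (by simp)
              · exact Or.inr (List.mem_append.mpr (Or.inl h))
          · simp only [List.mem_singleton] at hx
            have hr' : pvRel pairs c y := hx ▸ hr
            by_cases hy : y ∈ seen ++ [c]
            · exact Or.inl hy
            · refine Or.inr (List.mem_append.mpr (Or.inr ?_))
              rw [List.mem_filter]
              refine ⟨(hgr c y).mpr hr', ?_⟩
              simp only [Bool.not_eq_true']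
              exact (Bool.not_eq_true _).mp (fun h => hy ((PySem.Set.contains_iff _ y).mp h))
        have hlen1 : seen.length + 1 ≤ nI.toNat := by
          have := pvNodupRange_len (c :: seen) (by simp [hnd, hc]) (by
            intro x hx
            rcases List.mem_cons.mp hx with rfl | hx
            · exact hcr
            · exact hsr x hx)
          simpa using this
        have hflt : ((graph.getD c []).filter (fun y => !PySem.Set.contains (seen ++ [c]) y)).length ≤ D :=
          le_trans (List.length_filter_le _ _) (hdeg c)
        have hfuel1 : (q' ++ (graph.getD c []).filter (fun y => !PySem.Set.contains (seen ++ [c]) y)).length +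
            (nI.toNat - (seen ++ [c]).length) * (1 + D) ≤ f := by
          simp only [List.length_cons] at hfuel
          rw [List.length_append, List.length_append, List.length_singleton]
          have hsubst : nI.toNat - seen.length = (nI.toNat - (seen.length + 1)) + 1 := by omega
          rw [hsubst, add_mul, one_mul] at hfuel
          omega
        obtain ⟨Δ1, h1, h2, h3, h4, h5⟩ := ih (seen ++ [c]) _ (comp ++ [c]) hnd1 hsr1 hqr1 hfr1 hfuel1
        have hEq : (seen ++ [c]) ++ Δ1 = seen ++ (c :: Δ1) := by simp
        rw [hEq] at h1 h3 h4 h5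
        refine ⟨c :: Δ1, by rw [hstep, h1]; simp, ?_, ?_, h4, h5⟩
        · intro y hy
          rcases List.mem_cons.mp hy with rfl | hy
          · exact ⟨y, by simp, .refl⟩
          · obtain ⟨x, hx, he⟩ := h2 y hy
            rcases List.mem_append.mp hx with hx | hx
            · exact ⟨x, by simp [hx], he⟩
            · exact ⟨c, by simp, Relation.ReflTransGen.head ((hgr c x).mp (List.mem_filter.mp hx).1) he⟩
        · intro x hx
          rcases List.mem_cons.mp hx with rfl | hx
          · simp
          · exact h3 x (List.mem_append.mpr (Or.inl hx))

lemma pvRel_append_pair (ps : List (List Int)) (a b x y : Int) :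
    pvRel (ps ++ [[a, b]]) x y ↔ pvRel ps x y ∨ (x = a ∧ y = b) ∨ (x = b ∧ y = a) := by
  constructor
  · rintro ⟨a', b', hm, hc⟩
    rcases List.mem_append.mp hm with hm | hm
    · exact Or.inl ⟨a', b', hm, hc⟩
    · simp only [List.mem_singleton, List.cons.injEq, and_true] at hm
      obtain ⟨rfl, rfl, -⟩ := hm
      exact Or.inr hc
  · rintro (⟨a', b', hm, hc⟩ | hc)
    · exact ⟨a', b', List.mem_append.mpr (Or.inl hm), hc⟩
    · exact ⟨a, b, List.mem_append.mpr (Or.inr (by simp)), hc⟩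

lemma pvE_append_pair (ps : List (List Int)) (a b x y : Int) :
    pvE (ps ++ [[a, b]]) x y ↔
      pvE ps x y ∨ (pvE ps x a ∧ pvE ps b y) ∨ (pvE ps x b ∧ pvE ps a y) := by
  constructor
  · intro h
    induction h with
    | refl => exact Or.inl .refl
    | tail h1 hr ih =>
      rw [pvRel_append_pair] at hr
      rcases hr with hr | ⟨rfl, rfl⟩ | ⟨rfl, rfl⟩
      · rcases ih with ih | ⟨ih1, ih2⟩ | ⟨ih1, ih2⟩
        · exact Or.inl (ih.tail hr)
        · exact Or.inr (Or.inl ⟨ih1, ih2.tail hr⟩)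
        · exact Or.inr (Or.inr ⟨ih1, ih2.tail hr⟩)
      · rcases ih with ih | ⟨ih1, ih2⟩ | ⟨ih1, ih2⟩
        · exact Or.inr (Or.inl ⟨ih, .refl⟩)
        · exact Or.inr (Or.inl ⟨ih1, .refl⟩)
        · exact Or.inl ih1
      · rcases ih with ih | ⟨ih1, ih2⟩ | ⟨ih1, ih2⟩
        · exact Or.inr (Or.inr ⟨ih, .refl⟩)
        · exact Or.inl ih1
        · exact Or.inr (Or.inr ⟨ih1, .refl⟩)
  · have hmono : ∀ u v, pvE ps u v → pvE (ps ++ [[a, b]]) u v := fun u v h =>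
      Relation.ReflTransGen.mono (fun _ _ hr => (pvRel_append_pair ps a b _ _).mpr (Or.inl hr)) h
    have hab : pvE (ps ++ [[a, b]]) a b :=
      Relation.ReflTransGen.single ((pvRel_append_pair ps a b a b).mpr (Or.inr (Or.inl ⟨rfl, rfl⟩)))
    have hba : pvE (ps ++ [[a, b]]) b a :=
      Relation.ReflTransGen.single ((pvRel_append_pair ps a b b a).mpr (Or.inr (Or.inr ⟨rfl, rfl⟩)))
    rintro (h | ⟨h1, h2⟩ | ⟨h1, h2⟩)
    · exact hmono _ _ h
    · exact ((hmono _ _ h1).trans hab).trans (hmono _ _ h2)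
    · exact ((hmono _ _ h1).trans hba).trans (hmono _ _ h2)

lemma pvLabel_length (nI : Int) (pairs : List (List Int)) :
    (pvLabel nI pairs).length = nI.toNat := by
  rw [pvLabel]
  have : ∀ (ps : List (List Int)) (lab : List Int),
      (ps.foldl (fun lab p => match p with
        | [a, b] =>
          let la := pvLf lab a
          let lb := pvLf lab b
          if la ≠ lb then lab.map (fun x => if x = lb then la else x) else lab
        | _ => lab) lab).length = lab.length := by
    intro ps
    induction ps with
    | nil => intro lab; rfl
    | cons p t ih =>
      intro lab
      rw [List.foldl_cons, ih]
      rcases p with _ | ⟨a, _ | ⟨b, _ | ⟨c, u⟩⟩⟩ <;> simp only [] <;> try rfl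
      split <;> simp
  rw [this]
  simp [PySem.List.length_pyRange_one]

lemma pvLabel_spec (nI : Int) (pairs : List (List Int))
    (hv : ∀ p ∈ pairs, p.length = 2 ∧ ∀ x ∈ p, 0 ≤ x ∧ x < nI) :
    ∀ i j : Int, 0 ≤ i → i < nI → 0 ≤ j → j < nI →
      (pvLf (pvLabel nI pairs) i = pvLf (pvLabel nI pairs) j ↔ pvE pairs i j) := by
  revert hv
  induction pairs using List.reverseRecOn with
  | nil =>
    intro _ i j h0i hin h0j hjn
    have hid : ∀ t : Int, 0 ≤ t → t < nI → pvLf (pvLabel nI []) t = t := by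
      intro t h0 hlt
      have hlen : (pvLabel nI []).length = nI.toNat := pvLabel_length nI []
      have ht : t < ((pvLabel nI []).length : Int) := by rw [hlen]; omega
      rw [pvLf, PySem.List.pyGetD_eq_getElem _ _ h0 ht]
      simp only [pvLabel, List.foldl_nil]
      rw [PySem.List.getElem_pyRange_one]
      omega
    rw [hid i h0i hin, hid j h0j hjn]
    constructor
    · rintro rfl; exact .refl
    · intro h
      have hji := (Relation.reflTransGen_iff_eq (by rintro y ⟨a, b, hm, -⟩; simp at hm)).mp h
      rw [hji]
  | append_singleton ps p ih =>
    intro hv i j h0i hin h0j hjn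
    have hv' : ∀ q ∈ ps, q.length = 2 ∧ ∀ x ∈ q, 0 ≤ x ∧ x < nI :=
      fun q hq => hv q (List.mem_append.mpr (Or.inl hq))
    have hp := hv p (List.mem_append.mpr (Or.inr (by simp)))
    rcases p with _ | ⟨a, _ | ⟨b, _ | ⟨c, u⟩⟩⟩ <;> simp at hp
    obtain ⟨⟨h0a, han⟩, h0b, hbn⟩ := hp
    have ih' := ih hv'
    have hstep : pvLabel nI (ps ++ [[a, b]]) =
        (fun lab =>
          if pvLf lab a ≠ pvLf lab b then
            lab.map (fun x => if x = pvLf lab b then pvLf lab a else x)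
          else lab) (pvLabel nI ps) := by
      simp only [pvLabel, List.foldl_append, List.foldl_cons, List.foldl_nil]
    set lab := pvLabel nI ps with hlabdef
    by_cases hne : pvLf lab a ≠ pvLf lab b
    · rw [hstep]
      simp only [if_pos hne]
      have hlen : lab.length = nI.toNat := pvLabel_length nI ps
      have hLf : ∀ t : Int, 0 ≤ t → t < nI →
          pvLf (lab.map (fun x => if x = pvLf lab b then pvLf lab a else x)) t =
            if pvLf lab t = pvLf lab b then pvLf lab a else pvLf lab t := by
        intro t h0 hlt
        have ht : t < ((lab.map (fun x => if x = pvLf lab b then pvLf lab a else x)).length : Int) := by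
          rw [List.length_map, hlen]; omega
        have ht2 : t.toNat < lab.length := by rw [hlen]; omega
        rw [pvLf, PySem.List.pyGetD_eq_getElem _ _ h0 ht, List.getElem_map]
        have : lab[t.toNat] = pvLf lab t := by
          rw [pvLf, PySem.List.pyGetD_eq_getElem _ _ h0 (by rw [hlen]; omega)]
        rw [this]
      rw [hLf i h0i hin, hLf j h0j hjn, pvE_append_pair,
        ← ih' i j h0i hin h0j hjn, ← ih' i a h0i hin h0a han, ← ih' b j h0b hbn h0j hjn,
        ← ih' i b h0i hin h0b hbn, ← ih' a j h0a han h0j hjn]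
      split_ifs <;> constructor <;> intro hgoal <;> omega
    · rw [hstep]
      simp only [if_neg hne]
      rw [not_not] at hne
      have hab : pvE ps a b := (ih' a b h0a han h0b hbn).mp hne
      have hiff : pvE (ps ++ [[a, b]]) i j ↔ pvE ps i j := by
        rw [pvE_append_pair]
        constructor
        · rintro (h | ⟨h1, h2⟩ | ⟨h1, h2⟩)
          · exact h
          · exact (h1.trans hab).trans h2
          · exact (h1.trans (pvE_symm hab)).trans h2
        · exact Or.inl
      rw [hiff]
      exact ih' i j h0i hin h0j hjn

lemma pvOfList_map_Lf (lab : List Int) (N : Nat) :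
    PySem.Set.ofList ((PySem.List.pyRange 0 (N : Int) 1).map (pvLf lab)) =
      ((PySem.List.pyRange 0 (N : Int) 1).filter (fun i => pvMinRep lab i)).map (pvLf lab) := by
  induction N with
  | zero => simp [PySem.List.pyRange_one_eq_nil]
  | succ N ih =>
    have hcast : ((N + 1 : Nat) : Int) = (N : Int) + 1 := by push_cast; ring
    rw [hcast, PySem.List.pyRange_one_succ_right (by positivity), List.map_append]
    simp only [List.map_cons, List.map_nil]
    rw [PySem.Set.ofList_append_singleton, List.filter_append, List.map_append]
    by_cases h : pvLf lab (N : Int) ∈ PySem.Set.ofList ((PySem.List.pyRange 0 (N : Int) 1).map (pvLf lab))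
    · have hmem : ∃ j ∈ PySem.List.pyRange 0 (N : Int) 1, pvLf lab j = pvLf lab (N : Int) := by
        rw [PySem.Set.mem_ofList, List.mem_map] at h
        obtain ⟨j, hj, hje⟩ := h
        exact ⟨j, hj, hje⟩
      have hmin : pvMinRep lab (N : Int) = false := by
        obtain ⟨j, hj, hje⟩ := hmem
        rw [pvMinRep, Bool.eq_false_iff]
        intro hall
        rw [List.all_eq_true] at hall
        exact absurd (hall j hj) (by simp [hje])
      rw [PySem.Set.add_of_mem h, ih]
      simp [hmin]
    · have hmin : pvMinRep lab (N : Int) = true := by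
        rw [pvMinRep]
        simp only [List.all_eq_true, Bool.not_eq_true', beq_eq_false_iff_ne, ne_eq]
        intro j hj hje
        exact h (by rw [PySem.Set.mem_ofList, List.mem_map]; exact ⟨j, hj, hje⟩)
      rw [PySem.Set.add_of_not_mem h, ih]
      simp [hmin]

lemma pvGroups_values (lab : List Int) (N : Nat) :
    ((PySem.List.pyRange 0 (N : Int) 1).foldl
        (fun d i => d.modify (pvLf lab i) [] (· ++ [i])) PySem.Dict.empty).values =
      ((PySem.List.pyRange 0 (N : Int) 1).filter (fun i => pvMinRep lab i)).map
        (fun i => pvClassList (N : Int) lab (pvLf lab i)) := by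
  set r := PySem.List.pyRange 0 (N : Int) 1 with hr
  set d := r.foldl (fun d i => d.modify (pvLf lab i) [] (· ++ [i])) PySem.Dict.empty with hd
  have hnd : d.keys.Nodup :=
    PySem.Dict.nodup_keys_foldl_modify_key r (pvLf lab) [] (fun _ i => (· ++ [i])) _
      PySem.Dict.nodup_keys_empty
  have hkeys : d.keys = PySem.Set.ofList (r.map (pvLf lab)) := by
    rw [hd, PySem.Dict.keys_foldl_modify_key r (pvLf lab) [] (fun _ i => (· ++ [i]))]
    simp [PySem.Set.update_nil_left]
  have hgetD : ∀ k, d.getD k [] = r.filter (fun y => pvLf lab y == k) := by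
    intro k
    have hfold : d = (r.map (fun i => (pvLf lab i, i))).foldl
        (fun d p => d.modify p.1 [] (· ++ [p.2])) PySem.Dict.empty := by
      rw [hd, List.foldl_map]
    rw [hfold, PySem.Dict.getD_foldl_modify_append, List.filter_map, List.map_map]
    simp [Function.comp_def]
  rw [PySem.Dict.values_eq_map_keys d hnd [], hkeys, pvOfList_map_Lf, List.map_map]
  refine List.map_congr_left ?_
  intro i _
  simp only [Function.comp_def, hgetD]
  rfl

lemma pvOuterA (graph : PySem.Dict Int (List Int)) (pairs : List (List Int)) (cs : List Char)
    (lab : List Int) (fuel D : Nat)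
    (hgr : ∀ x y : Int, y ∈ graph.getD x [] ↔ pvRel pairs x y)
    (hdeg : ∀ c : Int, (graph.getD c []).length ≤ D)
    (hrange : ∀ x y, pvRel pairs x y → (0 ≤ x ∧ x < (cs.length : Int)) ∧ (0 ≤ y ∧ y < (cs.length : Int)))
    (hlab : ∀ i j : Int, 0 ≤ i → i < (cs.length : Int) → 0 ≤ j → j < (cs.length : Int) →
      (pvLf lab i = pvLf lab j ↔ pvE pairs i j))
    (hfuel : 1 + cs.length * (1 + D) ≤ fuel) :
    ∀ (k : Nat) (a : Int), a = (cs.length : Int) - k → 0 ≤ a →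
      ∀ (seen : List Int) (res : List Char),
        seen.Nodup →
        (∀ x ∈ seen, 0 ≤ x ∧ x < (cs.length : Int)) →
        (∀ x ∈ seen, ∀ y, pvRel pairs x y → y ∈ seen) →
        (∀ y, y ∈ seen ↔ ((0 ≤ y ∧ y < (cs.length : Int)) ∧ ∃ j, 0 ≤ j ∧ j < a ∧ pvE pairs j y)) →
        ((PySem.List.pyRange a (cs.length : Int) 1).foldl (pvProcessA graph fuel cs) (seen, res)).2 =
          ((PySem.List.pyRange a (cs.length : Int) 1).filter (fun i => pvMinRep lab i)).foldl
            (fun r i => pvWriteGroup cs r (pvClassList (cs.length : Int) lab (pvLf lab i))) res := by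
  intro k
  induction k with
  | zero =>
    intro a ha h0 seen res _ _ _ _
    rw [PySem.List.pyRange_one_eq_nil (by omega)]
    simp
  | succ k ih =>
    intro a ha h0 seen res hnd hsr hcl hchar
    by_cases hlt : a < (cs.length : Int)
    case neg =>
      rw [PySem.List.pyRange_one_eq_nil (by omega)]
      simp
    case pos =>
    rw [PySem.List.pyRange_one_cons hlt, List.foldl_cons, List.filter_cons]
    by_cases hseen : a ∈ seen
    · have hstep : pvProcessA graph fuel cs (seen, res) a = (seen, res) := by
        rw [pvProcessA, if_pos ((PySem.Set.contains_iff seen a).mpr hseen)]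
      have hmin : pvMinRep lab a = false := by
        obtain ⟨-, j, h0j, hja, hE⟩ := (hchar a).mp hseen
        rw [pvMinRep, Bool.eq_false_iff]
        intro hall
        rw [List.all_eq_true] at hall
        have hj : j ∈ PySem.List.pyRange 0 a 1 := by
          rw [PySem.List.mem_pyRange_one]; exact ⟨h0j, hja⟩
        have h2 := hall j hj
        have hLeq : pvLf lab j = pvLf lab a := (hlab j a h0j (by omega) h0 hlt).mpr hE
        simp [hLeq] at h2
      rw [hstep, hmin]
      simp only [Bool.false_eq_true, if_false]
      refine ih (a + 1) (by omega) (by omega) seen res hnd hsr hcl ?_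
      intro y
      rw [hchar y]
      constructor
      · rintro ⟨hr, j, h1, h2, h3⟩
        exact ⟨hr, j, h1, by omega, h3⟩
      · rintro ⟨hr, j, h1, h2, h3⟩
        refine ⟨hr, ?_⟩
        by_cases hja : j < a
        · exact ⟨j, h1, hja, h3⟩
        · have hje : j = a := by omega
          subst hje
          obtain ⟨-, j', h1', h2', h3'⟩ := (hchar j).mp hseen
          exact ⟨j', h1', h2', h3'.trans h3⟩
    · have hcond : ¬ PySem.Set.contains seen a = true :=
        fun h => hseen ((PySem.Set.contains_iff _ _).mp h)
      have hfuel' : ([a] : List Int).length + ((cs.length : Int).toNat - seen.length) * (1 + D) ≤ fuel := by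
        have h1 : ((cs.length : Int).toNat - seen.length) * (1 + D) ≤ cs.length * (1 + D) := by
          apply Nat.mul_le_mul_right
          simp [Int.toNat_natCast]
        simp only [List.length_singleton]
        omega
      obtain ⟨Δ, h1, h2, h3, h4, h5⟩ := pvBfsLoop_spec graph pairs (cs.length : Int) D hgr hdeg hrange
        fuel seen [a] [] hnd hsr
        (by intro x hx; rw [List.mem_singleton] at hx; subst hx; exact ⟨h0, hlt⟩)
        (fun x hx y hr => Or.inl (hcl x hx y hr)) hfuel'
      have hmemΔ : ∀ y, y ∈ Δ ↔ ((0 ≤ y ∧ y < (cs.length : Int)) ∧ pvE pairs a y) := by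
        intro y
        constructor
        · intro hy
          obtain ⟨x, hx, he⟩ := h2 y hy
          rw [List.mem_singleton] at hx
          subst hx
          refine ⟨?_, he⟩
          rcases pvE_range hrange he with rfl | hr2
          · exact ⟨h0, hlt⟩
          · exact hr2.2
        · rintro ⟨hyr, he⟩
          have hySΔ : y ∈ seen ++ Δ := pvClosed_rtg h4 (h3 a (by simp)) he
          rcases List.mem_append.mp hySΔ with hy | hy
          · exfalso
            obtain ⟨-, j, hj0, hja, hjE⟩ := (hchar y).mp hy
            exact hseen ((hchar a).mpr ⟨⟨h0, hlt⟩, j, hj0, hja, hjE.trans (pvE_symm he)⟩)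
          · exact hy
      have hmin : pvMinRep lab a = true := by
        rw [pvMinRep, List.all_eq_true]
        intro j hj
        rw [PySem.List.mem_pyRange_one] at hj
        simp only [Bool.not_eq_true', beq_eq_false_iff_ne, ne_eq]
        intro hLeq
        have hE : pvE pairs j a := (hlab j a hj.1 (by omega) h0 hlt).mp hLeq
        exact hseen ((hchar a).mpr ⟨⟨h0, hlt⟩, j, hj.1, hj.2, hE⟩)
      have hΔnd : Δ.Nodup := (List.nodup_append.mp h5).2.1
      have hsorted : PySem.List.sorted Δ (fun x => x) =
          pvClassList (cs.length : Int) lab (pvLf lab a) := by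
        apply PySem.List.sorted_eq_of_perm_of_pairwise_lt
        · rw [pvClassList, List.perm_ext_iff_of_nodup (List.Nodup.filter _ (PySem.List.nodup_pyRange_one 0 _)) hΔnd]
          intro y
          rw [List.mem_filter, PySem.List.mem_pyRange_one, hmemΔ y]
          constructor
          · rintro ⟨⟨hy0, hyL⟩, hb⟩
            have hLeq : pvLf lab y = pvLf lab a := by simpa using hb
            exact ⟨⟨hy0, hyL⟩, pvE_symm ((hlab y a hy0 hyL h0 hlt).mp hLeq)⟩
          · rintro ⟨⟨hy0, hyL⟩, he⟩
            refine ⟨⟨hy0, hyL⟩, ?_⟩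
            have hLeq : pvLf lab y = pvLf lab a :=
              (hlab y a hy0 hyL h0 hlt).mpr (pvE_symm he)
            simpa using hLeq
        · rw [pvClassList]
          exact List.Pairwise.filter _ (PySem.List.pairwise_lt_pyRange_one 0 _)
      have hstep : pvProcessA graph fuel cs (seen, res) a =
          (seen ++ Δ, pvWriteGroup cs res (pvClassList (cs.length : Int) lab (pvLf lab a))) := by
        simp only [pvProcessA]
        rw [if_neg hcond, h1]
        simp only [List.nil_append]
        rw [hsorted]
      rw [hstep, hmin]
      simp only [if_true]
      rw [List.foldl_cons]
      refine ih (a + 1) (by omega) (by omega) (seen ++ Δ) _ h5 ?_ h4 ?_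
      · intro x hx
        rcases List.mem_append.mp hx with hx | hx
        · exact hsr x hx
        · exact ((hmemΔ x).mp hx).1
      · intro y
        constructor
        · intro hy
          rcases List.mem_append.mp hy with hy | hy
          · obtain ⟨hr, j, hj0, hj1, hjE⟩ := (hchar y).mp hy
            exact ⟨hr, j, hj0, by omega, hjE⟩
          · obtain ⟨hr, he⟩ := (hmemΔ y).mp hy
            exact ⟨hr, a, h0, by omega, he⟩
        · rintro ⟨hr, j, hj0, hj1, hjE⟩
          by_cases hja : j < a
          · exact List.mem_append.mpr (Or.inl ((hchar y).mpr ⟨hr, j, hj0, hja, hjE⟩))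
          · have hje : j = a := by omega
            subst hje
            exact List.mem_append.mpr (Or.inr ((hmemΔ y).mpr ⟨hr, hjE⟩))

-- ===== VERDICT (by name: the statement is the Claim_ definition above) =====
theorem smallest_string_with_swaps_bfs_spec : Claim_equal_smallest_string_with_swaps_bfs := by
  intro s pairs _ hpre
  unfold Spec_smallest_string_with_swaps_bfs
  by_cases h : s.toList = [] ∨ pairs = []
  · rw [smallest_string_with_swaps_bfs, smallest_string_with_swaps_bfs_alt, if_pos h, if_pos h]
  · have hv : ∀ p ∈ pairs, p.length = 2 ∧ ∀ x ∈ p, 0 ≤ x ∧ x < (s.toList.length : Int) := by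
      rcases hpre with h1 | h2 | hv
      · exact absurd (Or.inl h1) h
      · exact absurd (Or.inr h2) h
      · exact hv
    rw [smallest_string_with_swaps_bfs, smallest_string_with_swaps_bfs_alt, if_neg h, if_neg h]
    simp only [PySem.Str.len_eq]
    set cs := s.toList with hcs
    set L : Int := (cs.length : Int) with hL
    set lab := pvLabel L pairs with hlab0
    set D := 2 * pairs.length with hD
    set fuel := 1 + (cs.length + 1) * (1 + 2 * pairs.length) with hfuelDef
    have hgr := fun x y => pvRel_iff_mem_graph L pairs x y
    have hdeg : ∀ c : Int, ((pvBuildGraph L pairs).getD c []).length ≤ D :=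
      fun c => pvGraph_deg L pairs c
    have hrange : ∀ x y, pvRel pairs x y → (0 ≤ x ∧ x < L) ∧ (0 ≤ y ∧ y < L) :=
      fun x y hr => pvRel_range hv hr
    have hlabiff := pvLabel_spec L pairs hv
    have hfuelge : 1 + cs.length * (1 + D) ≤ fuel := by
      rw [hD, hfuelDef]
      have h2 : cs.length * (1 + 2 * pairs.length) ≤ (cs.length + 1) * (1 + 2 * pairs.length) :=
        Nat.mul_le_mul_right _ (by omega)
      omega
    have hchar0 : ∀ y : Int, y ∈ ([] : List Int) ↔
        ((0 ≤ y ∧ y < L) ∧ ∃ j, 0 ≤ j ∧ j < (0 : Int) ∧ pvE pairs j y) := by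
      intro y
      constructor
      · intro hy; simp at hy
      · rintro ⟨-, j, hj0, hj1, -⟩; omega
    have hA := pvOuterA (pvBuildGraph L pairs) pairs cs lab fuel D hgr hdeg hrange hlabiff hfuelge
      cs.length 0 (by omega) (le_refl 0) [] cs List.nodup_nil (by simp) (by simp) hchar0
    have hempty : (PySem.Set.empty : PySem.Set Int) = [] := rfl
    rw [hempty, hA, pvGroups_values lab cs.length, List.foldl_map]
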